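-- pv_equiv track=rewrite | github.com/pcast31/schur | extension/schur_5/check_partitions.py | is_sum_free
-- ===== SOURCE A (Python) =====
-- def is_sum_free(subset):
--     list_subset = sorted(subset)
--     set_subset = set(subset)
--     maxi = list_subset[-1]
--     for i, num in enumerate(list_subset):
--         if 2 * num > maxi:
--             break
--         for j in range(i, len(list_subset)):
--             add = num + list_subset[j]
--             if add > maxi:
--                 break
--             if add in set_subset:
--                 return False
--     return True
-- ===== SOURCE B (Python) =====
-- def is_sum_free(subset):
--     elems = set(subset)
--     for c in elems:
--         for x in elems:
--             if c - x in elems: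
--                 return False
--     return True
-- ===== Notes on version B (the rewrite author's own statement) =====
-- stated objective: simpler
-- what changed: Replaces A's sort + pruned pair-enumeration (nested indexed loops with 2*num>maxi and add>maxi breaks) by a complement-lookup 2SUM over the distinct elements: for each target c and addend x test whether c - x is in the set; no sorting, no index bookkeeping.
import Mathlib
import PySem

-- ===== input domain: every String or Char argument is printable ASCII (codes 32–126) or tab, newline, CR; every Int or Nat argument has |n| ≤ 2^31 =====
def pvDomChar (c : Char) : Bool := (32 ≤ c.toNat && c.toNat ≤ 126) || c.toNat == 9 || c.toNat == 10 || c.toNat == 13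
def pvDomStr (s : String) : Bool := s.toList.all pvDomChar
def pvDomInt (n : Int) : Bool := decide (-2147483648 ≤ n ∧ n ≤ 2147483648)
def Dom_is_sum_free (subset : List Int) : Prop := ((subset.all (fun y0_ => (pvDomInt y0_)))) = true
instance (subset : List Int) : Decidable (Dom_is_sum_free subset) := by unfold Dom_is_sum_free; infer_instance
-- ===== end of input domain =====

-- B replaces A's sorted pair enumeration with pruning breaks by a complement-lookup 2SUM
-- (for each target c and addend x, test c - x for membership); objective: simpler.

-- ===== PORT A =====
-- inner 'for j in range(i, len(list_subset))' loop; returns true iff Python hits 'return False'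
def isfA_inner (l s : List Int) (maxi num : Int) (j : Nat) : Bool :=
  if h : j < l.length then
    let add := num + l[j]
    if add > maxi then false
    else if PySem.Set.contains s add then true
    else isfA_inner l s maxi num (j + 1)
  else false
termination_by l.length - j

-- outer 'for i, num in enumerate(list_subset)' loop; returns true iff Python hits 'return False'
def isfA_outer (l s : List Int) (maxi : Int) (i : Nat) : Bool :=
  if h : i < l.length then
    let num := l[i]
    if 2 * num > maxi then false
    else if isfA_inner l s maxi num i then true
    else isfA_outer l s maxi (i + 1)
  else false
termination_by l.length - i

def is_sum_free (subset : List Int) : Bool :=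
  let list_subset := PySem.List.sorted subset (fun x => x) false
  let set_subset : PySem.Set Int := PySem.Set.ofList subset
  match PySem.List.pyGet? list_subset (-1) with
  | none => true                 -- IndexError on empty input; excluded by Pre_
  | some maxi => !(isfA_outer list_subset set_subset maxi 0)

-- ===== PORT B =====
def is_sum_free_alt (subset : List Int) : Bool :=
  let elems : PySem.Set Int := PySem.Set.ofList subset
  !(elems.any fun c => elems.any fun x => PySem.Set.contains elems (c - x))

-- ===== PRECONDITION & SPEC =====
-- A raises IndexError (list_subset[-1]) on the empty list; nothing else is excluded.
def Pre_is_sum_free (subset : List Int) : Prop := subset ≠ []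
instance (subset : List Int) : Decidable (Pre_is_sum_free subset) := by unfold Pre_is_sum_free; infer_instance
def pvWitness_is_sum_free : List Int := ([1, 3])

def Spec_is_sum_free (subset : List Int) (out : Bool) : Prop := out = is_sum_free_alt subset
instance (subset : List Int) (out : Bool) : Decidable (Spec_is_sum_free subset out) := by unfold Spec_is_sum_free; infer_instance

-- ===== CLAIM (what is proved, stated in full; the proofs are below) =====
def Claim_equal_is_sum_free : Prop := ∀ (subset : List Int), Dom_is_sum_free subset → Pre_is_sum_free subset → Spec_is_sum_free subset (is_sum_free subset)

-- ===== LEMMAS AND PROOFS =====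

-- the common characterisation: a pair of elements (possibly the same one twice) sums into the list
def PyPairSum (subset : List Int) : Prop := ∃ a ∈ subset, ∃ b ∈ subset, a + b ∈ subset

-- B-side
lemma alt_eq_true_iff (subset : List Int) :
    is_sum_free_alt subset = true ↔ ¬ PyPairSum subset := by
  unfold is_sum_free_alt PyPairSum
  simp only [Bool.not_eq_eq_eq_not, Bool.not_true, List.any_eq_false,
    PySem.Set.contains_eq_listContains, List.contains_eq_mem, Bool.not_eq_true,
    decide_eq_false_iff_not, PySem.Set.mem_ofList]
  constructor
  · rintro h ⟨a, ha, b, hb, hab⟩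
    exact h (a + b) hab a ha (by simpa using hb)
  · rintro h c hc x hx hmem
    exact h ⟨x, hx, c - x, hmem, by simpa using hc⟩

-- A-side: the inner loop finds a partner k ≥ j for num, despite its 'add > maxi' break
lemma inner_iff (l s : List Int) (maxi num : Int)
    (hmax : ∀ x ∈ s, x ≤ maxi)
    (hsort : ∀ p q : Nat, (hp : p < l.length) → (hq : q < l.length) → p ≤ q → l[p] ≤ l[q]) :
    ∀ d j, l.length - j ≤ d →
      (isfA_inner l s maxi num j = true ↔
        ∃ k, ∃ hk : k < l.length, j ≤ k ∧ num + l[k] ∈ s) := by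
  intro d
  induction d with
  | zero =>
    intro j hj
    have hjl : ¬ j < l.length := by omega
    rw [isfA_inner]
    simp only [hjl, dif_neg, not_false_iff]
    constructor
    · intro h; cases h
    · rintro ⟨k, hk2, hk1, _⟩; omega
  | succ d ih =>
    intro j hj
    by_cases hjl : j < l.length
    · rw [isfA_inner]
      simp only [dif_pos hjl]
      by_cases hadd : num + l[j] > maxi
      · simp only [if_pos hadd]
        constructor
        · intro h; cases h
        · rintro ⟨k, hk2, hk1, hmem⟩
          exfalso
          have h1 : l[j] ≤ l[k] := hsort j k hjl hk2 hk1
          have h2 : num + l[k] ≤ maxi := hmax _ hmem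
          omega
      · simp only [if_neg hadd]
        by_cases hc : num + l[j] ∈ s
        · rw [if_pos (by simpa [PySem.Set.contains_eq_listContains] using hc)]
          simp only [true_iff]
          exact ⟨j, hjl, le_refl _, hc⟩
        · rw [if_neg (by simpa [PySem.Set.contains_eq_listContains] using hc)]
          rw [ih (j + 1) (by omega)]
          constructor
          · rintro ⟨k, hk2, hk1, hmem⟩; exact ⟨k, hk2, by omega, hmem⟩
          · rintro ⟨k, hk2, hk1, hmem⟩
            refine ⟨k, hk2, ?_, hmem⟩
            rcases Nat.eq_or_lt_of_le hk1 with rfl | h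
            · exact absurd hmem hc
            · omega
    · rw [isfA_inner]
      simp only [hjl, dif_neg, not_false_iff]
      constructor
      · intro h; cases h
      · rintro ⟨k, hk2, hk1, _⟩; omega

-- A-side: the outer loop finds an index pair p ≤ q, despite its '2*num > maxi' break
lemma outer_iff (l s : List Int) (maxi : Int)
    (hmax : ∀ x ∈ s, x ≤ maxi)
    (hsort : ∀ p q : Nat, (hp : p < l.length) → (hq : q < l.length) → p ≤ q → l[p] ≤ l[q]) :
    ∀ d i, l.length - i ≤ d →
      (isfA_outer l s maxi i = true ↔
        ∃ p, ∃ hp : p < l.length, ∃ q, ∃ hq : q < l.length,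
          i ≤ p ∧ p ≤ q ∧ l[p] + l[q] ∈ s) := by
  intro d
  induction d with
  | zero =>
    intro i hi
    have hil : ¬ i < l.length := by omega
    rw [isfA_outer]
    simp only [hil, dif_neg, not_false_iff]
    constructor
    · intro h; cases h
    · rintro ⟨p, hp, q, hq, hp1, hpq, _⟩; omega
  | succ d ih =>
    intro i hi
    by_cases hil : i < l.length
    · rw [isfA_outer]
      simp only [dif_pos hil]
      by_cases hbr : 2 * l[i] > maxi
      · simp only [if_pos hbr]
        constructor
        · intro h; cases h
        · rintro ⟨p, hp, q, hq, hp1, hpq, hmem⟩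
          exfalso
          have h1 : l[i] ≤ l[p] := hsort i p hil hp hp1
          have h2 : l[p] ≤ l[q] := hsort p q hp hq hpq
          have h3 : l[p] + l[q] ≤ maxi := hmax _ hmem
          omega
      · simp only [if_neg hbr]
        by_cases hin : isfA_inner l s maxi (l[i]) i = true
        · rw [if_pos hin]
          simp only [true_iff]
          obtain ⟨k, hk2, hk1, hmem⟩ :=
            (inner_iff l s maxi (l[i]) hmax hsort l.length i (by omega)).mp hin
          exact ⟨i, hil, k, hk2, le_refl _, hk1, hmem⟩
        · rw [if_neg hin]
          rw [ih (i + 1) (by omega)]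
          constructor
          · rintro ⟨p, hp, q, hq, hp1, rest⟩; exact ⟨p, hp, q, hq, by omega, rest⟩
          · rintro ⟨p, hp, q, hq, hp1, hpq, hmem⟩
            by_cases hpi : p = i
            · subst hpi
              exact absurd ((inner_iff l s maxi (l[p]) hmax hsort l.length p (by omega)).mpr
                ⟨q, hq, hpq, hmem⟩) hin
            · exact ⟨p, hp, q, hq, by omega, hpq, hmem⟩
    · rw [isfA_outer]
      simp only [hil, dif_neg, not_false_iff]
      constructor
      · intro h; cases h
      · rintro ⟨p, hp, q, hq, hp1, hpq, _⟩; omega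

-- the index pairs of the sorted list are exactly the element pairs of the input
lemma pairs_iff_pairSum (subset : List Int) :
    (∃ p, ∃ hp : p < (PySem.List.sorted subset (fun x => x) false).length,
      ∃ q, ∃ hq : q < (PySem.List.sorted subset (fun x => x) false).length,
        0 ≤ p ∧ p ≤ q ∧
        (PySem.List.sorted subset (fun x => x) false)[p] +
        (PySem.List.sorted subset (fun x => x) false)[q] ∈ subset)
      ↔ PyPairSum subset := by
  set l := PySem.List.sorted subset (fun x => x) false with hl
  have hperm : l.Perm subset := PySem.List.sorted_perm subset (fun x => x) false
  constructor
  · rintro ⟨p, hp, q, hq, _, hpq, hmem⟩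
    exact ⟨l[p], hperm.mem_iff.mp (l.getElem_mem _), l[q],
      hperm.mem_iff.mp (l.getElem_mem _), hmem⟩
  · rintro ⟨a, ha, b, hb, hab⟩
    obtain ⟨p0, hp0, hpa⟩ := List.mem_iff_getElem.mp (hperm.mem_iff.mpr ha)
    obtain ⟨q0, hq0, hqb⟩ := List.mem_iff_getElem.mp (hperm.mem_iff.mpr hb)
    rcases Nat.le_total p0 q0 with h | h
    · exact ⟨p0, hp0, q0, hq0, Nat.zero_le _, h, by rw [hpa, hqb]; exact hab⟩
    · exact ⟨q0, hq0, p0, hp0, Nat.zero_le _, h, by rw [hqb, hpa, Int.add_comm]; exact hab⟩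

-- ===== VERDICT (by name: the statement is the Claim_ definition above) =====
theorem is_sum_free_spec : Claim_equal_is_sum_free := by
  intro subset _ hpre
  unfold Spec_is_sum_free is_sum_free
  show (match PySem.List.pyGet? (PySem.List.sorted subset (fun x => x) false) (-1) with
        | none => true
        | some m => !isfA_outer (PySem.List.sorted subset (fun x => x) false)
            (PySem.Set.ofList subset) m 0) = is_sum_free_alt subset
  set l := PySem.List.sorted subset (fun x => x) false with hl
  have hlen : l ≠ [] := by
    intro h
    exact hpre ((PySem.List.sorted_eq_nil_iff subset (fun x => x) false).mp h)
  have hlast : PySem.List.pyGet? l (-1) = l.getLast? := PySem.List.pyGet?_neg_one l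
  obtain ⟨maxi, hmaxi⟩ : ∃ m, l.getLast? = some m :=
    Option.ne_none_iff_exists'.mp (by simpa [List.getLast?_eq_none_iff] using hlen)
  rw [hlast, hmaxi]
  show (!isfA_outer l (PySem.Set.ofList subset) maxi 0) = is_sum_free_alt subset
  have hpos : 0 < l.length := List.length_pos_iff.mpr hlen
  have hsort : ∀ p q : Nat, (hp : p < l.length) → (hq : q < l.length) → p ≤ q → l[p] ≤ l[q] := by
    intro p q hp hq hpq
    exact PySem.List.sorted_id_getElem_mono subset hpq hq
  -- maxi is the last element of the sorted list, hence an upper bound of the set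
  have hmaxi' : maxi = l[l.length - 1]'(by omega) := by
    rw [List.getLast?_eq_getElem?, List.getElem?_eq_getElem (by omega : l.length - 1 < l.length)] at hmaxi
    exact (Option.some_inj.mp hmaxi).symm
  have hmax : ∀ x ∈ (PySem.Set.ofList subset : List Int), x ≤ maxi := by
    intro x hx
    have hxl : x ∈ l :=
      ((PySem.List.sorted_perm subset (fun x => x) false).mem_iff).mpr ((PySem.Set.mem_ofList _ _).mp hx)
    obtain ⟨k, hk, hkx⟩ := List.mem_iff_getElem.mp hxl
    rw [hmaxi', ← hkx]
    exact hsort k (l.length - 1) hk (by omega) (by omega)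
  have houter := outer_iff l (PySem.Set.ofList subset) maxi hmax hsort l.length 0 (by omega)
  have halt := alt_eq_true_iff subset
  have hpairs := pairs_iff_pairSum subset
  rw [← hl] at hpairs
  by_cases hH : PyPairSum subset
  · have h1 : isfA_outer l (PySem.Set.ofList subset) maxi 0 = true :=
      houter.mpr (by
        obtain ⟨p, hp, q, hq, h0, hpq, hmem⟩ := hpairs.mpr hH
        exact ⟨p, hp, q, hq, Nat.zero_le _, hpq, by simpa [PySem.Set.mem_ofList] using hmem⟩)
    have h2 : is_sum_free_alt subset = false := by
      cases h : is_sum_free_alt subset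
      · rfl
      · exact absurd (halt.mp h) (by simpa using hH)
    simp [h1, h2]
  · have h1 : isfA_outer l (PySem.Set.ofList subset) maxi 0 = false := by
      cases h : isfA_outer l (PySem.Set.ofList subset) maxi 0
      · rfl
      · exfalso
        apply hH
        apply hpairs.mp
        obtain ⟨p, hp, q, hq, h0, hpq, hmem⟩ := houter.mp h
        exact ⟨p, hp, q, hq, Nat.zero_le _, hpq, by simpa [PySem.Set.mem_ofList] using hmem⟩
    have h2 : is_sum_free_alt subset = true := halt.mpr hH
    simp [h1, h2]
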